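-- pv_equiv track=rewrite | github.com/EII-Tokyo/openpi0.5-rtc | scripts/compare_embeddings.py | find_embedding_key
-- ===== SOURCE A (Python) =====
-- def find_embedding_key(flat_params):
--     """查找 embedding 参数的键。"""
--     embedding_key = None
--     for key in flat_params:
--         key_str = "/".join(key)
--         if "embedder" in key_str and "input_embedding" in key_str:
--             embedding_key = key
--             break
--
--     if embedding_key is None:
--         # 尝试其他可能的路径
--         for key in flat_params:
--             if "input_embedding" in "/".join(key):
--                 embedding_key = key
--                 break
--
--     if embedding_key is None:
--         raise ValueError("找不到 embedding 参数。可用的键: " + str(list(flat_params.keys())[:10]))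
--
--     return embedding_key
-- ===== SOURCE B (Python) =====
-- def find_embedding_key(flat_params):
--     """查找 embedding 参数的键。"""
--     fallback = None
--     for key in flat_params:
--         ks = "/".join(key)
--         if "embedder" in ks and "input_embedding" in ks:
--             return key
--         if fallback is None and "input_embedding" in ks:
--             fallback = key
--     if fallback is None:
--         raise ValueError("找不到 embedding 参数。可用的键: " + str(list(flat_params.keys())[:10]))
--     return fallback
-- ===== Notes on version B (the rewrite author's own statement) =====
-- stated objective: simpler
-- what changed: Replaces A's two sequential scans (first for embedder+input_embedding, then a second full scan for input_embedding alone) by one single pass that returns a both-match immediately and remembers the first input_embedding-only key as a fallback.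
import Mathlib
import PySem

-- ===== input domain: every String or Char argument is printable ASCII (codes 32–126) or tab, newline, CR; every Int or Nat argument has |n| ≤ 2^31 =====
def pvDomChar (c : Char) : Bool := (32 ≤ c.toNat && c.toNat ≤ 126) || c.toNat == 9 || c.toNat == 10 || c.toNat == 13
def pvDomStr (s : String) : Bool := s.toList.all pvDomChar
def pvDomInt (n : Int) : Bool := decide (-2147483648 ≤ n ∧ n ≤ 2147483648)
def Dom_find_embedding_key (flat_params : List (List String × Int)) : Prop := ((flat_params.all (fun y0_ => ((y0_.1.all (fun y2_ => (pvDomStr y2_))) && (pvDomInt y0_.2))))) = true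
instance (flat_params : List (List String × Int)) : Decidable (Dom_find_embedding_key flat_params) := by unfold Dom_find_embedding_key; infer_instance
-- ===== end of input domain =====

-- B is one single pass (immediate return on a both-match, first input_embedding-only key kept as fallback)
-- instead of A's two sequential scans; same ValueError outside Pre_.

-- ===== PORT A =====
-- first loop: break on a key whose joined string contains both "embedder" and "input_embedding"
def fekLoop1 : List (List String × Int) → Option (List String)
  | [] => none
  | (k, _) :: rest =>
    let key_str := PySem.Str.join "/" k
    if PySem.Str.isIn "embedder" key_str && PySem.Str.isIn "input_embedding" key_str then some k
    else fekLoop1 rest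

-- second loop: break on a key whose joined string contains "input_embedding"
def fekLoop2 : List (List String × Int) → Option (List String)
  | [] => none
  | (k, _) :: rest =>
    if PySem.Str.isIn "input_embedding" (PySem.Str.join "/" k) then some k
    else fekLoop2 rest

def find_embedding_key (flat_params : List (List String × Int)) : List String :=
  let embedding_key := fekLoop1 flat_params
  let embedding_key := match embedding_key with
    | some k => some k
    | none => fekLoop2 flat_params
  match embedding_key with
  | some k => k
  | none => []  -- Python raises ValueError here; excluded by Pre_find_embedding_key

-- ===== PORT B =====
-- single pass with a fallback accumulator
def fekScan : List (List String × Int) → Option (List String) → Option (List String)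
  | [], fallback => fallback
  | (k, _) :: rest, fallback =>
    let ks := PySem.Str.join "/" k
    if PySem.Str.isIn "embedder" ks && PySem.Str.isIn "input_embedding" ks then some k
    else fekScan rest (if fallback.isNone && PySem.Str.isIn "input_embedding" ks then some k else fallback)

def find_embedding_key_alt (flat_params : List (List String × Int)) : List String :=
  match fekScan flat_params none with
  | some k => k
  | none => []  -- Python raises ValueError here; excluded by Pre_find_embedding_key

-- ===== PRECONDITION & SPEC =====
-- Pre_ excludes exactly the inputs with no key containing "input_embedding", where both Pythons raise ValueError.
def Pre_find_embedding_key (flat_params : List (List String × Int)) : Prop :=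
  ∃ p ∈ flat_params, PySem.Str.isIn "input_embedding" (PySem.Str.join "/" p.1) = true
instance (flat_params : List (List String × Int)) : Decidable (Pre_find_embedding_key flat_params) := by
  unfold Pre_find_embedding_key; infer_instance

def pvWitness_find_embedding_key : (List (List String × Int)) := [(["embedder", "input_embedding"], 0)]

def Spec_find_embedding_key (flat_params : List (List String × Int)) (out : List String) : Prop := out = find_embedding_key_alt flat_params
instance (flat_params : List (List String × Int)) (out : List String) : Decidable (Spec_find_embedding_key flat_params out) := by unfold Spec_find_embedding_key; infer_instance

-- ===== CLAIM (what is proved, stated in full; the proofs are below) =====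
def Claim_equal_find_embedding_key : Prop := ∀ (flat_params : List (List String × Int)), Dom_find_embedding_key flat_params → Pre_find_embedding_key flat_params → Spec_find_embedding_key flat_params (find_embedding_key flat_params)

-- ===== LEMMAS AND PROOFS =====
-- B's single pass equals: first-loop hit, else the earlier fallback, else the second-loop hit.
theorem fekScan_eq (fp : List (List String × Int)) (fb : Option (List String)) :
    fekScan fp fb = ((fekLoop1 fp).orElse (fun _ => fb.orElse (fun _ => fekLoop2 fp))) := by
  induction fp generalizing fb with
  | nil => cases fb <;> simp [fekScan, fekLoop1, fekLoop2, Option.orElse]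
  | cons hd tl ih =>
    obtain ⟨k, v⟩ := hd
    cases h1 : PySem.Str.isIn "embedder" (PySem.Str.join "/" k) <;>
      cases h2 : PySem.Str.isIn "input_embedding" (PySem.Str.join "/" k) <;>
      cases fb <;>
      simp_all [fekScan, fekLoop1, fekLoop2, Option.orElse]

-- ===== VERDICT (by name: the statement is the Claim_ definition above) =====
theorem find_embedding_key_spec : Claim_equal_find_embedding_key := by
  intro fp _ _
  unfold Spec_find_embedding_key find_embedding_key find_embedding_key_alt
  rw [fekScan_eq]
  cases h1 : fekLoop1 fp <;> cases h2 : fekLoop2 fp <;> simp [Option.orElse]
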